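-- pv_equiv track=rewrite | github.com/PerryJones901/advent-of-code-2021 | day_07.py | total_fuel_needed_for_position
-- ===== SOURCE A (Python) =====
-- from typing import List
--
-- def total_fuel_needed_for_position(input: List[int], target_position: int, part1: bool) -> int:
--     fuel_spent = 0
--     for crab_position in input:
--         distance = abs(target_position - crab_position)
--         if part1:
--             fuel_for_crab = distance
--         else:
--             fuel_for_crab = (distance * (distance + 1)) // 2
--         fuel_spent += fuel_for_crab
--     return fuel_spent
-- ===== SOURCE B (Python) =====
-- def total_fuel_needed_for_position(input, target_position, part1):
--     # Branch-free algebraic formulation: no per-crab abs() or triangular term.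
--     # sum |t-x| = (2k-n)*t + s - 2*sl  where k,sl count/sum crabs with x <= t;
--     # sum (t-x)^2 = n*t^2 - 2*t*s + sum x^2;  part-2 answer = (sum_sq + sum_dist)//2
--     # since each d^2+d is even.
--     t = target_position
--     n = len(input)
--     s = sum(input)
--     k = sum(1 for x in input if x <= t)
--     sl = sum(x for x in input if x <= t)
--     dist = (2 * k - n) * t + s - 2 * sl
--     if part1:
--         return dist
--     sq = n * t * t - 2 * t * s + sum(x * x for x in input)
--     return (sq + dist) // 2
-- ===== Notes on version B (the rewrite author's own statement) =====
-- stated objective: alternative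
-- what changed: B replaces A's per-crab abs/triangular loop with an algebraic moment computation: staged builtin passes collect n, sum, sum of squares, and count/sum of crabs at or below the target, then closed-form identities give the distance sum (via the <=t split, no abs) and the squared-distance sum (as a polynomial in the moments), combined once by (sq+dist)//2.
import Mathlib
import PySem

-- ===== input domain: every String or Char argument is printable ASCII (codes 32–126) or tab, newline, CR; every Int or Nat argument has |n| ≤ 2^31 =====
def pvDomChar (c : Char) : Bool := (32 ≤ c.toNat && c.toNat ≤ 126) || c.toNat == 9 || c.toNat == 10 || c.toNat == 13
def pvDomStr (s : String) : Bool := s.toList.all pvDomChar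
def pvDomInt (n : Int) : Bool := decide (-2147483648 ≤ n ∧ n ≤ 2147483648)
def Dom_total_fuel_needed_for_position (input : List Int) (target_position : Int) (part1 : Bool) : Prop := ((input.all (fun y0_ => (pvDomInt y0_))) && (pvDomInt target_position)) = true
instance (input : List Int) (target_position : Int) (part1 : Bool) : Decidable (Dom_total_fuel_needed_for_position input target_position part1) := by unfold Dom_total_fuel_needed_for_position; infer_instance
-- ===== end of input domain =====

-- B replaces A's per-crab abs/triangular loop by staged moment sums (n, Σx, Σx², count and
-- sum of crabs ≤ target) combined by closed-form identities (alternative decomposition; same cost).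


-- ===== PORT A =====
-- A's loop: one running total, per-crab branch on part1 (triangular cost via Python //).
def total_fuel_needed_for_position (input : List Int) (target_position : Int) (part1 : Bool) : Int :=
  input.foldl (fun fuel_spent crab_position =>
    fuel_spent + (if part1 then |target_position - crab_position|
                  else PySem.Int.floordiv (|target_position - crab_position| * (|target_position - crab_position| + 1)) 2)) 0

-- ===== PORT B =====
-- B: staged builtin-style sums (len, sum, count ≤ t, sum ≤ t, sum of squares), then closed forms.
def total_fuel_needed_for_position_alt (input : List Int) (target_position : Int) (part1 : Bool) : Int :=
  let t := target_position
  let n : Int := input.length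
  let s := input.foldl (fun a x => a + x) 0
  let k := input.foldl (fun a x => a + (if x ≤ t then 1 else 0)) 0
  let sl := input.foldl (fun a x => a + (if x ≤ t then x else 0)) 0
  let dist := (2 * k - n) * t + s - 2 * sl
  if part1 then dist
  else
    let sq := n * t * t - 2 * t * s + input.foldl (fun a x => a + x * x) 0
    PySem.Int.floordiv (sq + dist) 2

-- ===== PRECONDITION & SPEC =====
def Spec_total_fuel_needed_for_position (input : List Int) (target_position : Int) (part1 : Bool) (out : Int) : Prop := out = total_fuel_needed_for_position_alt input target_position part1
instance (input : List Int) (target_position : Int) (part1 : Bool) (out : Int) : Decidable (Spec_total_fuel_needed_for_position input target_position part1 out) := by unfold Spec_total_fuel_needed_for_position; infer_instance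

-- ===== CLAIM =====
def Claim_equal_total_fuel_needed_for_position : Prop := ∀ (input : List Int) (target_position : Int) (part1 : Bool), Dom_total_fuel_needed_for_position input target_position part1 → Spec_total_fuel_needed_for_position input target_position part1 (total_fuel_needed_for_position input target_position part1)

-- ===== LEMMAS AND PROOFS =====

-- Any fold of shape 'a + f x' splits off its accumulator.
theorem pvFoldShift (f : Int → Int) (l : List Int) (acc : Int) :
    l.foldl (fun a x => a + f x) acc = acc + l.foldl (fun a x => a + f x) 0 := by
  induction l generalizing acc with
  | nil => simp
  | cons x xs ih =>
    simp only [List.foldl_cons]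
    rw [ih, ih (0 + f x)]
    ring

-- d*(d+1)//2 doubled is d*d + d (the numerator is even).
theorem pvTri_half (d : Int) : PySem.Int.floordiv (d * (d + 1)) 2 * 2 = d * d + d := by
  rw [PySem.Int.floordiv_eq_ediv_of_pos (by norm_num : (0:Int) < 2)]
  have h := (Int.even_mul_succ_self d).two_dvd
  have he : d * (d + 1) = d * d + d := by ring
  rw [he] at h ⊢
  omega

-- A's part-1 sum equals B's moment combination for the distance sum.
theorem pvDistSum (t : Int) (l : List Int) :
    l.foldl (fun a x => a + |t - x|) 0
    = (2 * l.foldl (fun a x => a + (if x ≤ t then 1 else 0)) 0 - (l.length : Int)) * t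
      + l.foldl (fun a x => a + x) 0
      - 2 * l.foldl (fun a x => a + (if x ≤ t then x else 0)) 0 := by
  induction l with
  | nil => simp
  | cons x xs ih =>
    simp only [List.foldl_cons, List.length_cons]
    rw [pvFoldShift (fun x => |t - x|), pvFoldShift (fun x => x),
        pvFoldShift (fun x => if x ≤ t then 1 else 0), pvFoldShift (fun x => if x ≤ t then x else 0)]
    rw [ih]
    push_cast
    by_cases h : x ≤ t
    · rw [abs_of_nonneg (by omega), if_pos h, if_pos h]; ring
    · rw [abs_of_neg (by omega), if_neg (by omega), if_neg (by omega)]; ring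

-- Twice A's part-2 sum equals the squared-distance sum plus the distance sum.
theorem pvDouble (t : Int) (l : List Int) :
    2 * l.foldl (fun a x => a + PySem.Int.floordiv (|t - x| * (|t - x| + 1)) 2) 0
    = ((l.length : Int) * t * t - 2 * t * l.foldl (fun a x => a + x) 0
        + l.foldl (fun a x => a + x * x) 0)
      + l.foldl (fun a x => a + |t - x|) 0 := by
  induction l with
  | nil => simp
  | cons x xs ih =>
    simp only [List.foldl_cons, List.length_cons]
    rw [pvFoldShift (fun x => PySem.Int.floordiv (|t - x| * (|t - x| + 1)) 2),
        pvFoldShift (fun x => x), pvFoldShift (fun x => x * x), pvFoldShift (fun x => |t - x|)]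
    have h1 := pvTri_half (|t - x|)
    have h2 : |t - x| * |t - x| = (t - x) * (t - x) := abs_mul_abs_self _
    push_cast
    nlinarith [ih]

theorem pvMain (input : List Int) (t : Int) (p : Bool) :
    total_fuel_needed_for_position input t p = total_fuel_needed_for_position_alt input t p := by
  unfold total_fuel_needed_for_position total_fuel_needed_for_position_alt
  cases p with
  | true =>
    simp only [if_true]
    exact pvDistSum t input
  | false =>
    simp only [Bool.false_eq_true, if_false]
    have hd := pvDouble t input
    rw [← pvDistSum t input]
    rw [eq_comm, PySem.Int.floordiv_eq_iff_of_pos (by norm_num : (0:Int) < 2)]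
    omega

-- ===== VERDICT =====
theorem total_fuel_needed_for_position_spec : Claim_equal_total_fuel_needed_for_position := by
  intro input t p _
  unfold Spec_total_fuel_needed_for_position
  exact pvMain input t p
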